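-- pv_equiv track=rewrite | github.com/sgyeong97/Code-Test | 1st_coding_test/corona_keep_distance.py | solution
-- ===== SOURCE A (Python) =====
-- def solution(lineUp, level):
--     distance = -1
--     for x in lineUp:
--         if (distance == -1):
--             if x:
--                 distance = 0
--         else:
--             if not(x):
--                 distance += 1
--             else:
--                 if distance < level:
--                     return False
--                 else:
--                     distance = 0
--     return True
-- ===== SOURCE B (Python) =====
-- def solution(lineUp, level):
--     idxs = [i for i, x in enumerate(lineUp) if x]
--     return all(b - a > level for a, b in zip(idxs, idxs[1:]))
-- ===== Notes on version B (the rewrite author's own statement) =====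
-- stated objective: simpler
-- what changed: Replaces the stateful single-pass distance counter with early return by: collect the occupied indices, then check every consecutive pair differs by more than level.
import Mathlib
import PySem

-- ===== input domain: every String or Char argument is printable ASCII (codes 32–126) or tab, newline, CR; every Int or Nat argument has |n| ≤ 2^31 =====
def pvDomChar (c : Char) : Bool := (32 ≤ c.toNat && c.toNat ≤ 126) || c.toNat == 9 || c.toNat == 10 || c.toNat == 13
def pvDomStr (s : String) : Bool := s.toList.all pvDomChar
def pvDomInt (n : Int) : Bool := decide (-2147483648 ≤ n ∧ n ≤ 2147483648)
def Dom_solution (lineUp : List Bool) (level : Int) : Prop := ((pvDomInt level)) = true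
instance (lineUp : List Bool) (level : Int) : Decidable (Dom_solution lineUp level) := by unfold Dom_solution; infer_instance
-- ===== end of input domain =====

-- ===== PORT A =====
-- B changes the decomposition: occupied-index list + consecutive-pair check, instead of A's stateful distance counter (objective: simpler).
-- Port of A's loop: distance accumulator with -1 sentinel, early return False.
def goA (level : Int) : List Bool → Int → Bool
  | [], _ => true
  | x :: xs, d =>
    if d = -1 then
      (if x then goA level xs 0 else goA level xs d)
    else
      if !x then goA level xs (d + 1)
      else if d < level then false
      else goA level xs 0

def solution (lineUp : List Bool) (level : Int) : Bool :=
  goA level lineUp (-1)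

-- ===== PORT B =====
def solution_alt (lineUp : List Bool) (level : Int) : Bool :=
  let idxs := (PySem.List.enumerate lineUp 0).filterMap (fun p => if p.2 then some p.1 else none)
  (idxs.zip idxs.tail).all (fun p => decide (p.2 - p.1 > level))

-- ===== PRECONDITION & SPEC =====
def Spec_solution (lineUp : List Bool) (level : Int) (out : Bool) : Prop := out = solution_alt lineUp level
instance (lineUp : List Bool) (level : Int) (out : Bool) : Decidable (Spec_solution lineUp level out) := by unfold Spec_solution; infer_instance

-- ===== CLAIM (what is proved, stated in full; the proofs are below) =====
def Claim_equal_solution : Prop := ∀ (lineUp : List Bool) (level : Int), Dom_solution lineUp level → Spec_solution lineUp level (solution lineUp level)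

-- ===== LEMMAS AND PROOFS =====

-- indices (offset by n) of the occupied positions
def occ (n : Int) : List Bool → List Int
  | [] => []
  | x :: xs => if x then n :: occ (n + 1) xs else occ (n + 1) xs

-- pairwise check with explicit previous index p
def chkFrom (level p : Int) : List Int → Bool
  | [] => true
  | a :: r => decide (a - p > level) && chkFrom level a r

def chkZip (level : Int) (l : List Int) : Bool :=
  (l.zip l.tail).all (fun p => decide (p.2 - p.1 > level))

theorem occ_enum (xs : List Bool) : ∀ n : Int,
    (PySem.List.enumerate xs n).filterMap (fun p => if p.2 then some p.1 else none) = occ n xs := by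
  induction xs with
  | nil => intro n; simp [PySem.List.enumerate_nil, occ]
  | cons x xs ih =>
    intro n
    cases x <;> simp [PySem.List.enumerate_cons, occ, ih]

theorem chkFrom_eq_zip (level : Int) (l : List Int) : ∀ p : Int,
    chkFrom level p l = chkZip level (p :: l) := by
  induction l with
  | nil => intro p; simp [chkFrom, chkZip]
  | cons a r ih =>
    intro p
    show (decide (a - p > level) && chkFrom level a r) = chkZip level (p :: a :: r)
    rw [ih a]
    simp [chkZip, List.zip]

theorem goA_pos (level : Int) (xs : List Bool) : ∀ (n d : Int), 0 ≤ d →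
    goA level xs d = chkFrom level (n - d - 1) (occ n xs) := by
  induction xs with
  | nil => intro n d _; simp [goA, occ, chkFrom]
  | cons x xs ih =>
    intro n d hd
    cases x with
    | false =>
      have : goA level (false :: xs) d = goA level xs (d + 1) := by
        simp [goA]; omega
      rw [this, ih (n + 1) (d + 1) (by omega)]
      simp only [occ, if_neg (Bool.false_ne_true)]
      congr 1
      omega
    | true =>
      have hne : ¬ d = -1 := by omega
      by_cases hl : d < level
      · have h1 : goA level (true :: xs) d = false := by simp [goA, hne, hl]
        have h2 : ¬ (n - (n - d - 1) > level) := by omega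
        simp [h1, occ, chkFrom, h2]
      · have h1 : goA level (true :: xs) d = goA level xs 0 := by simp [goA, hne, hl]
        have h2 : decide (n - (n - d - 1) > level) = true := decide_eq_true (by omega)
        have ho : occ n (true :: xs) = n :: occ (n + 1) xs := by simp [occ]
        have hn : n + 1 - 0 - 1 = n := by omega
        rw [h1, ih (n + 1) 0 le_rfl, hn, ho]
        simp [chkFrom, h2]

theorem goA_neg (level : Int) (xs : List Bool) : ∀ n : Int,
    goA level xs (-1) = (match occ n xs with
                         | [] => true
                         | a :: r => chkFrom level a r) := by
  induction xs with
  | nil => intro n; simp [goA, occ]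
  | cons x xs ih =>
    intro n
    cases x with
    | false =>
      have : goA level (false :: xs) (-1) = goA level xs (-1) := by simp [goA]
      rw [this, ih (n + 1)]
      simp [occ]
    | true =>
      have h1 : goA level (true :: xs) (-1) = goA level xs 0 := by simp [goA]
      have ho : occ n (true :: xs) = n :: occ (n + 1) xs := by simp [occ]
      have hn : n + 1 - 0 - 1 = n := by omega
      rw [h1, goA_pos level xs (n + 1) 0 le_rfl, hn, ho]

-- ===== VERDICT (by name: the statement is the Claim_ definition above) =====
theorem solution_spec : Claim_equal_solution := by
  intro lineUp level _
  unfold Spec_solution solution solution_alt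
  rw [occ_enum lineUp 0]
  show goA level lineUp (-1) = chkZip level (occ 0 lineUp)
  rw [goA_neg level lineUp 0]
  cases h : occ 0 lineUp with
  | nil => simp [chkZip]
  | cons a r => exact chkFrom_eq_zip level r a
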